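-- pv_equiv track=rewrite | github.com/siliconMagic/python | poker.py | list_all_hands
-- ===== SOURCE A (Python) =====
-- def list_all_hands(hand):
--     red_joker = [r+s for r in '23456789TJQKA' for s in 'HD']
--     black_joker = [r+s for r in '23456789TJQKA' for s in 'SC']
--     hand_list = []
--     if '?R' in hand and '?B' in hand:
--         card_spot_red, card_spot_black = hand.index('?R'), hand.index('?B')
--         for wild_card_red in red_joker:
--             for wild_card_black in black_joker:
--                 hand = hand[:]
--                 hand[card_spot_red], hand[card_spot_black] = wild_card_red, wild_card_black
--                 hand_list.append(hand)
--         return hand_list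
--     elif '?R' in hand:
--         card_spot_red = hand.index('?R')
--         for wild_card_red in red_joker:
--             hand = hand[:]
--             hand[card_spot_red] = wild_card_red
--             hand_list.append(hand)
--         return hand_list
--     elif '?B' in hand:
--         card_spot_black = hand.index('?B')
--         for wild_card_black in black_joker:
--             hand = hand[:]
--             hand[card_spot_black] = wild_card_black
--             hand_list.append(hand)
--         return hand_list
--     else:
--         hand_list.append(hand)
--         return hand_list
-- ===== SOURCE B (Python) =====
-- def list_all_hands(hand):
--     red_joker = [r + s for r in '23456789TJQKA' for s in 'HD']
--     black_joker = [r + s for r in '23456789TJQKA' for s in 'SC']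
--     spots = [(hand.index(marker), cands)
--              for marker, cands in (('?R', red_joker), ('?B', black_joker))
--              if marker in hand]
--     results = [list(hand)]
--     for idx, cands in spots:
--         results = [h[:idx] + [c] + h[idx + 1:] for h in results for c in cands]
--     return results
-- ===== Notes on version B (the rewrite author's own statement) =====
-- stated objective: simpler
-- what changed: Replaced the four explicit branch cases and nested per-branch loops with one data-driven pass: collect the present wildcard markers (red then black) with their first index and candidate list, then fold substitution lists over a single result list.
import Mathlib
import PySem

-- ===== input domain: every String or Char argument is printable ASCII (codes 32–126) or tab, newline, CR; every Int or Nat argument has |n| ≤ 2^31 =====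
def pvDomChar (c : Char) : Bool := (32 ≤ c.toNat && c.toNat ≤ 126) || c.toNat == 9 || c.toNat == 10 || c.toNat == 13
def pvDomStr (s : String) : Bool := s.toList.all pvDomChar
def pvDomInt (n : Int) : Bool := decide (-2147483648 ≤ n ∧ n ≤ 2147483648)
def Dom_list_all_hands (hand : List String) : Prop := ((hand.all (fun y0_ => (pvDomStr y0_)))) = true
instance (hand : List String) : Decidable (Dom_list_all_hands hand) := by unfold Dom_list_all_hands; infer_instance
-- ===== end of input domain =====

-- B replaces A's four explicit joker-branch cases by one data-driven substitution pass (objective: simpler).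

-- ===== PORT A =====
-- [r+s for r in '23456789TJQKA' for s in suits]
def pvJokers (suits : String) : List String :=
  ("23456789TJQKA".toList).flatMap (fun r => (suits.toList).map (fun s => String.ofList [r, s]))

-- literal port of A; the loop state carries (hand_list, hand) since Python rebinds `hand`
-- inside the loops; `.getD 0` on index? is only reached under the matching membership guard,
-- where Python's hand.index cannot raise.
def list_all_hands (hand : List String) : List (List String) :=
  let red_joker := pvJokers "HD"
  let black_joker := pvJokers "SC"
  if "?R" ∈ hand ∧ "?B" ∈ hand then
    let card_spot_red := (PySem.List.index? hand "?R").getD 0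
    let card_spot_black := (PySem.List.index? hand "?B").getD 0
    (red_joker.foldl (fun st wild_card_red =>
      black_joker.foldl (fun st2 wild_card_black =>
        ((st2.1 ++ [(st2.2.set card_spot_red wild_card_red).set card_spot_black wild_card_black]),
         (st2.2.set card_spot_red wild_card_red).set card_spot_black wild_card_black)) st)
      (([] : List (List String)), hand)).1
  else if "?R" ∈ hand then
    let card_spot_red := (PySem.List.index? hand "?R").getD 0
    (red_joker.foldl (fun st wild_card_red =>
      ((st.1 ++ [st.2.set card_spot_red wild_card_red]), st.2.set card_spot_red wild_card_red))
      (([] : List (List String)), hand)).1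
  else if "?B" ∈ hand then
    let card_spot_black := (PySem.List.index? hand "?B").getD 0
    (black_joker.foldl (fun st wild_card_black =>
      ((st.1 ++ [st.2.set card_spot_black wild_card_black]), st.2.set card_spot_black wild_card_black))
      (([] : List (List String)), hand)).1
  else
    [hand]

-- ===== PORT B =====
-- h[:idx] + [c] + h[idx+1:]
def pvSubst (h : List String) (idx : Nat) (c : String) : List String :=
  PySem.List.slice h none (some (idx : Int)) ++ [c] ++ PySem.List.slice h (some ((idx : Int) + 1)) none

def list_all_hands_alt (hand : List String) : List (List String) :=
  let red_joker := pvJokers "HD"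
  let black_joker := pvJokers "SC"
  let spots := ([("?R", red_joker), ("?B", black_joker)] : List (String × List String)).filterMap
    (fun mc => if mc.1 ∈ hand then
        some ((PySem.List.index? hand mc.1).getD 0, mc.2) else none)
  spots.foldl (fun results ic =>
      results.flatMap (fun h => ic.2.map (fun c => pvSubst h ic.1 c)))
    [hand]

-- ===== PRECONDITION & SPEC =====
def Spec_list_all_hands (hand : List String) (out : List (List String)) : Prop := out = list_all_hands_alt hand
instance (hand : List String) (out : List (List String)) : Decidable (Spec_list_all_hands hand out) := by unfold Spec_list_all_hands; infer_instance

-- ===== CLAIM (what is proved, stated in full; the proofs are below) =====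
def Claim_equal_list_all_hands : Prop := ∀ (hand : List String), Dom_list_all_hands hand → Spec_list_all_hands hand (list_all_hands hand)

-- ===== LEMMAS AND PROOFS =====

-- B's slice substitution is List.set when the index is in range
theorem pvSubst_eq_set (h : List String) (i : Nat) (hi : i < h.length) (c : String) :
    pvSubst h i c = h.set i c := by
  unfold pvSubst
  rw [show ((i:Int)+1) = ((i+1 : Nat):Int) by push_cast; ring]
  simp only [PySem.List.slice_to_natCast, PySem.List.slice_from_natCast]
  rw [List.set_eq_take_append_cons_drop, if_pos hi]
  simp

-- A's inner stateful loop: the collected first components are a map of the substitution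
-- over the candidates, and the final rebound hand is either the start hand or one substitution of it.
theorem pvLoopPair (f : List String → String → List String)
    (hff : ∀ h a b, f (f h a) b = f h b)
    (l : List String) :
    ∀ (init : List (List String)) (h0 : List String),
      ∃ h1, l.foldl (fun st b => (st.1 ++ [f st.2 b], f st.2 b)) (init, h0)
          = (init ++ l.map (f h0), h1) ∧ (h1 = h0 ∨ ∃ b, h1 = f h0 b) := by
  induction l with
  | nil => intro init h0; exact ⟨h0, by simp, Or.inl rfl⟩
  | cons a t ih =>
    intro init h0
    obtain ⟨h1, he, hp⟩ := ih (init ++ [f h0 a]) (f h0 a)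
    refine ⟨h1, ?_, ?_⟩
    · simp only [List.foldl_cons, he, List.map_cons,
        show f (f h0 a) = f h0 from funext (hff h0 a)]
      simp
    · rcases hp with h | ⟨b, hb⟩
      · exact Or.inr ⟨a, h⟩
      · exact Or.inr ⟨b, by rw [hb, hff]⟩

-- A's nested two-joker loop, as a flatMap of maps
theorem pvLoop2 (g : List String → String → String → List String)
    (hgg : ∀ h a b a' b', g (g h a b) a' b' = g h a' b')
    (lr lb : List String) :
    ∀ (init : List (List String)) (h0 : List String),
      ∃ h1, lr.foldl (fun st a => lb.foldl (fun st2 b =>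
              (st2.1 ++ [g st2.2 a b], g st2.2 a b)) st) (init, h0)
          = (init ++ lr.flatMap (fun a => lb.map (g h0 a)), h1)
          ∧ ∀ a b, g h1 a b = g h0 a b := by
  induction lr with
  | nil => intro init h0; exact ⟨h0, by simp, fun _ _ => rfl⟩
  | cons a t ih =>
    intro init h0
    obtain ⟨hmid, hemid, hpmid⟩ :=
      pvLoopPair (f := fun h b => g h a b) (fun h b b' => hgg h a b a b') lb init h0
    have hmid_pt : ∀ a' b', g hmid a' b' = g h0 a' b' := by
      rcases hpmid with h | ⟨b, hb⟩
      · intro a' b'; rw [h]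
      · intro a' b'; rw [hb, hgg]
    obtain ⟨h1, he, hp⟩ := ih (init ++ lb.map (fun b => g h0 a b)) hmid
    refine ⟨h1, ?_, fun a' b' => (hp a' b').trans (hmid_pt a' b')⟩
    simp only [List.foldl_cons, hemid, he, List.flatMap_cons]
    have : (fun a' => lb.map (g hmid a')) = (fun a' => lb.map (g h0 a')) := by
      funext a'; exact List.map_congr_left (fun b' _ => hmid_pt a' b')
    rw [this]
    simp

theorem index_facts {xs : List String} {v : String} (hm : v ∈ xs) :
    ∃ k, PySem.List.index? xs v = some k ∧ k < xs.length ∧ xs[k]? = some v := by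
  have hs : (PySem.List.index? xs v).isSome := (PySem.List.index?_isSome_iff xs v).2 hm
  obtain ⟨k, hk⟩ := Option.isSome_iff_exists.1 hs
  obtain ⟨hlt, hget, _⟩ := PySem.List.getElem_of_index?_eq_some hk
  exact ⟨k, hk, hlt, by rw [List.getElem?_eq_getElem hlt, hget]⟩

theorem list_all_hands_eq_alt (hand : List String) :
    list_all_hands hand = list_all_hands_alt hand := by
  unfold list_all_hands list_all_hands_alt
  by_cases hR : "?R" ∈ hand
  · by_cases hB : "?B" ∈ hand
    · -- both jokers present
      obtain ⟨ir, hir, hirlt, hirget⟩ := index_facts hR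
      obtain ⟨ib, hib, hiblt, hibget⟩ := index_facts hB
      have hne : ir ≠ ib := by
        intro h; rw [h, hibget] at hirget; simp at hirget
      simp only [if_pos hR, if_pos hB, if_pos (And.intro hR hB), hir, hib, Option.getD_some,
        List.filterMap_cons, List.filterMap_nil]
      rw [List.foldl_cons, List.foldl_cons, List.foldl_nil]
      obtain ⟨h1, he, -⟩ :=
        pvLoop2 (g := fun h a b => (h.set ir a).set ib b)
          (fun h a b a' b' => by
            simp only []
            rw [List.set_comm b a' (Ne.symm hne), List.set_set, List.set_set])
          (pvJokers "HD") (pvJokers "SC") [] hand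
      rw [show (pvJokers "HD").foldl (fun st wr => (pvJokers "SC").foldl (fun st2 wb =>
            (st2.1 ++ [(st2.2.set ir wr).set ib wb], (st2.2.set ir wr).set ib wb)) st)
            (([] : List (List String)), hand) = _ from he]
      simp only [List.nil_append, List.flatMap_cons, List.flatMap_nil, List.append_nil]
      rw [List.flatMap_map]
      refine (List.flatMap_congr (fun wr _ => ?_)).symm
      rw [pvSubst_eq_set hand ir hirlt wr]
      exact List.map_congr_left (fun wb _ =>
        pvSubst_eq_set (hand.set ir wr) ib (by simpa using hiblt) wb)
    · -- red joker only
      obtain ⟨ir, hir, hirlt, -⟩ := index_facts hR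
      simp only [if_neg (by tauto : ¬("?R" ∈ hand ∧ "?B" ∈ hand)), if_pos hR, if_neg hB,
        hir, Option.getD_some, List.filterMap_cons, List.filterMap_nil]
      rw [List.foldl_cons, List.foldl_nil]
      obtain ⟨h1, he, -⟩ :=
        pvLoopPair (f := fun h c => h.set ir c) (fun h a b => List.set_set ..)
          (pvJokers "HD") [] hand
      rw [show (pvJokers "HD").foldl (fun st c => (st.1 ++ [st.2.set ir c], st.2.set ir c))
            (([] : List (List String)), hand) = _ from he]
      simp only [List.nil_append, List.flatMap_cons, List.flatMap_nil, List.append_nil]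
      exact (List.map_congr_left (fun c _ => pvSubst_eq_set hand ir hirlt c)).symm
  · by_cases hB : "?B" ∈ hand
    · -- black joker only
      obtain ⟨ib, hib, hiblt, -⟩ := index_facts hB
      simp only [if_neg (by tauto : ¬("?R" ∈ hand ∧ "?B" ∈ hand)), if_neg hR, if_pos hB,
        hib, Option.getD_some, List.filterMap_cons, List.filterMap_nil]
      rw [List.foldl_cons, List.foldl_nil]
      obtain ⟨h1, he, -⟩ :=
        pvLoopPair (f := fun h c => h.set ib c) (fun h a b => List.set_set ..)
          (pvJokers "SC") [] hand
      rw [show (pvJokers "SC").foldl (fun st c => (st.1 ++ [st.2.set ib c], st.2.set ib c))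
            (([] : List (List String)), hand) = _ from he]
      simp only [List.nil_append, List.flatMap_cons, List.flatMap_nil, List.append_nil]
      exact (List.map_congr_left (fun c _ => pvSubst_eq_set hand ib hiblt c)).symm
    · -- no jokers
      simp [if_neg (by tauto : ¬("?R" ∈ hand ∧ "?B" ∈ hand)), if_neg hR, if_neg hB]

-- ===== VERDICT (by name: the statement is the Claim_ definition above) =====
theorem list_all_hands_spec : Claim_equal_list_all_hands := by
  intro hand _
  exact list_all_hands_eq_alt hand
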